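-- pv_equiv track=rewrite | github.com/kantuni/edX | ITMOx - How to Win Coding Competitions/Week 1/generate_tests_test.py | solve
-- ===== SOURCE A (Python) =====
-- import math
--
-- def number_of_divisors(n):
--     counter = 0
--
--     for i in range(1, int(math.sqrt(n)) + 1):
--         if n % i == 0:
--             if n / i == i:
--                 # perfect square
--                 counter += 1
--             else:
--                 counter += 2
--
--     return counter
--
-- def solve(k):
--     primes = [True] * (k + 1)
--     primes[0] = False
--     primes[1] = False
--
--     # sieve of Eratosthenes
--     for i in range(2, int(math.sqrt(k)) + 1):
--         if primes[i]:
--             j = 0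
--             while i * i + j * i < k + 1:
--                 primes[i * i + j * i] = False
--                 j += 1
--
--     divisors = [2] * (k + 1)
--     divisors[0] = 0
--     divisors[1] = 1
--
--     maximum = 0
--     maximum_index = 0
--
--     for i in range(2, k + 1):
--         if primes[i]:
--             counter = 2
--         else:
--             counter = number_of_divisors(i)
--
--         if maximum < counter:
--             maximum = counter
--             maximum_index = i
--
--         divisors[i] = counter
--
--     return k - maximum_index + 1
-- ===== SOURCE B (Python) =====
-- def solve(k):
--     # divisor-count sieve: add 1 to every multiple of each d, then first-max scan
--     div = [0] * (k + 1)
--     for d in range(1, k + 1):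
--         for q in range(1, k // d + 1):
--             div[d * q] += 1
--     best = 0
--     best_index = 0
--     for i in range(2, k + 1):
--         if best < div[i]:
--             best = div[i]
--             best_index = i
--     return k - best_index + 1
-- ===== Notes on version B (the rewrite author's own statement) =====
-- stated objective: faster
-- what changed: Replaces A's Eratosthenes prime sieve plus per-number O(sqrt i) trial-division divisor counting by a single additive divisor-count sieve (add 1 to every multiple of every d), followed by the same first-maximum scan.
import Mathlib
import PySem

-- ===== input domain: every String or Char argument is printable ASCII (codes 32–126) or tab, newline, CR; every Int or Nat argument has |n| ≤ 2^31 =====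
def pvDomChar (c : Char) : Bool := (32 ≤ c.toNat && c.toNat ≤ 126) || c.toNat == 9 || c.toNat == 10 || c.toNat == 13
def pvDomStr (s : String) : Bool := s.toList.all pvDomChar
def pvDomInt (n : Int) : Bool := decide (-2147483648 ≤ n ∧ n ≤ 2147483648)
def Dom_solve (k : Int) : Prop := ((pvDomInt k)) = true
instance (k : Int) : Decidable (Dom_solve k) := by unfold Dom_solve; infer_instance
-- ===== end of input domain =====

-- B replaces A's prime sieve + per-number √i trial counting by one additive divisor-count sieve
-- (add 1 to every multiple of every d) followed by the same first-maximum scan; return value only.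
set_option maxHeartbeats 1000000

-- ===== PORT A =====
-- helper number_of_divisors; int(math.sqrt(n)) is ported as Nat.sqrt (exact for the nonnegative n
-- it is called on inside Dom); in the n % i == 0 branch Python's n / i is an exact integer, so
-- integer division is exact there.
def numberOfDivisors (n : Int) : Int :=
  (List.range (Nat.sqrt n.toNat)).foldl
    (fun counter (i0 : Nat) =>
      let i : Int := (i0 : Int) + 1
      if n % i = 0 then (if n / i = i then counter + 1 else counter + 2) else counter) 0

-- the inner `while` loop of the sieve; the fuel k.toNat + 1 is a totality guard only (each
-- iteration moves the write position i*i + j*i up by i ≥ 2, so at most k iterations happen)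
def sieveInner (fuel : Nat) (i : Nat) (k : Int) (j : Nat) (primes : List Bool) : List Bool :=
  match fuel with
  | 0 => primes
  | fuel + 1 =>
    if ((i * i + j * i : Nat) : Int) < k + 1 then
      sieveInner fuel i k (j + 1) (primes.set (i * i + j * i) false)
    else primes

-- body of `for i in range(2, int(math.sqrt(k)) + 1)`
def sieveStep (k : Int) (pr : List Bool) (i : Nat) : List Bool :=
  if pr.getD i false then sieveInner (k.toNat + 1) i k 0 pr else pr

-- body of `for i in range(2, k + 1)`; state = (maximum, maximum_index, divisors)
def mainStepA (primes : List Bool) (st : Int × Int × List Int) (i : Nat) : Int × Int × List Int :=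
  let counter : Int := if primes.getD i false then 2 else numberOfDivisors (i : Int)
  let mm : Int × Int := if st.1 < counter then (counter, (i : Int)) else (st.1, st.2.1)
  (mm.1, mm.2, st.2.2.set i counter)

def solve (k : Int) : Int :=
  let primes0 := ((List.replicate (k.toNat + 1) true).set 0 false).set 1 false
  let primes := (List.range' 2 (Nat.sqrt k.toNat - 1)).foldl (sieveStep k) primes0
  let divisors0 := ((List.replicate (k.toNat + 1) (2 : Int)).set 0 0).set 1 1
  let st := (List.range' 2 (k.toNat - 1)).foldl (mainStepA primes) (0, 0, divisors0)
  k - st.2.1 + 1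

-- ===== PORT B =====
-- body of `for q in range(1, k // d + 1): div[d * q] += 1`
def addMultiples (d : Nat) (dv : List Int) (q : Nat) : List Int :=
  dv.set (d * q) (dv.getD (d * q) 0 + 1)

-- body of `for d in range(1, k + 1)`
def divSieveStep (k : Int) (dv : List Int) (d : Nat) : List Int :=
  (List.range' 1 (k.toNat / d)).foldl (addMultiples d) dv

-- body of `for i in range(2, k + 1)`; state = (best, best_index)
def mainStepB (div : List Int) (st : Int × Int) (i : Nat) : Int × Int :=
  if st.1 < div.getD i 0 then (div.getD i 0, (i : Int)) else st

def solve_alt (k : Int) : Int :=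
  let div := (List.range' 1 k.toNat).foldl (divSieveStep k) (List.replicate (k.toNat + 1) (0 : Int))
  let st := (List.range' 2 (k.toNat - 1)).foldl (mainStepB div) ((0 : Int), (0 : Int))
  k - st.2 + 1

-- ===== PRECONDITION & SPEC =====
-- Pre_ excludes exactly k ≤ 0, where A raises IndexError (primes[0] / primes[1] on a list of
-- length k+1 ≤ 1); A returns normally on every k ≥ 1.
def Pre_solve (k : Int) : Prop := 1 ≤ k
instance (k : Int) : Decidable (Pre_solve k) := by unfold Pre_solve; infer_instance
def pvWitness_solve : Int := 6

def Spec_solve (k : Int) (out : Int) : Prop := out = solve_alt k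
instance (k : Int) (out : Int) : Decidable (Spec_solve k out) := by unfold Spec_solve; infer_instance

-- ===== CLAIM (what is proved, stated in full; the proofs are below) =====
def Claim_equal_solve : Prop := ∀ (k : Int), Dom_solve k → Pre_solve k → Spec_solve k (solve k)

-- ===== LEMMAS AND PROOFS =====

-- small List.getD helpers
theorem getD_set_self {α : Type} (l : List α) (i : Nat) (v d : α) (h : i < l.length) :
    (l.set i v).getD i d = v := by
  simp [List.getD_eq_getElem?_getD, List.getElem?_set_self h]

theorem getD_set_ne {α : Type} (l : List α) (i j : Nat) (v d : α) (h : i ≠ j) :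
    (l.set i v).getD j d = l.getD j d := by
  simp [List.getD_eq_getElem?_getD, List.getElem?_set_ne h]

theorem getD_replicate_of_lt {α : Type} (n i : Nat) (v d : α) (h : i < n) :
    (List.replicate n v).getD i d = v := by
  simp [List.getD_eq_getElem?_getD, h]

-- ---------- the number-of-divisors helper counts τ(m) ----------

def nodF (m d : Nat) : Int := if d ∣ m then (if d * d = m then 1 else 2) else 0

theorem nodStep (m : Nat) (c : Int) (i0 : Nat) :
    (if (m : Int) % ((i0 : Int) + 1) = 0 then
      (if (m : Int) / ((i0 : Int) + 1) = (i0 : Int) + 1 then c + 1 else c + 2) else c)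
    = c + nodF m (i0 + 1) := by
  have hcast : ((i0 : Int) + 1) = ((i0 + 1 : Nat) : Int) := by push_cast; ring
  rw [hcast]
  unfold nodF
  by_cases hd : (i0 + 1) ∣ m
  · have hm0 : m % (i0 + 1) = 0 := by
      obtain ⟨c, rfl⟩ := hd
      exact Nat.mul_mod_right _ _
    have h1 : (m : Int) % ((i0 + 1 : Nat) : Int) = 0 := by
      rw [← Int.natCast_mod, hm0]; rfl
    rw [if_pos h1, if_pos hd]
    have h2 : ((m : Int) / ((i0 + 1 : Nat) : Int) = ((i0 + 1 : Nat) : Int)) ↔ (m / (i0 + 1) = i0 + 1) := by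
      rw [← Int.natCast_div]; exact Nat.cast_inj
    have h3 : (m / (i0 + 1) = i0 + 1) ↔ (m = (i0 + 1) * (i0 + 1)) :=
      Nat.div_eq_iff_eq_mul_left (Nat.succ_pos i0) hd
    by_cases hsq : (i0 + 1) * (i0 + 1) = m
    · rw [if_pos (h2.mpr (h3.mpr hsq.symm)), if_pos hsq]
    · rw [if_neg (fun h => hsq ((h3.mp (h2.mp h)).symm)), if_neg hsq]
  · have h1 : ¬ ((m : Int) % ((i0 + 1 : Nat) : Int) = 0) := by
      rw [← Int.natCast_mod]
      intro h
      exact hd (Nat.dvd_of_mod_eq_zero (by exact_mod_cast h))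
    rw [if_neg h1, if_neg hd]
    ring

theorem nodFold (m : Nat) : ∀ (s : Nat) (c : Int),
    (List.range s).foldl
      (fun counter (i0 : Nat) =>
        let i : Int := (i0 : Int) + 1
        if (m : Int) % i = 0 then
          (if (m : Int) / i = i then counter + 1 else counter + 2) else counter) c
    = c + ∑ i ∈ Finset.range s, nodF m (i + 1) := by
  intro s
  induction s with
  | zero => intro c; simp
  | succ s ih =>
    intro c
    rw [List.range_succ, List.foldl_append, List.foldl_cons, List.foldl_nil, ih,
      Finset.sum_range_succ]
    dsimp only
    rw [nodStep m _ s]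
    ring

theorem pair_lt (m d : Nat) (hm : 0 < m) (hd : d ∣ m) (h : d * d < m) :
    m < (m / d) * (m / d) := by
  have hd0 : 0 < d := Nat.pos_of_dvd_of_pos hd hm
  obtain ⟨c, rfl⟩ := hd
  rw [Nat.mul_div_cancel_left c hd0]
  have hdc : d < c := Nat.lt_of_mul_lt_mul_left h
  have hc0 : 0 < c := by omega
  nlinarith

theorem pair_lt' (m e : Nat) (hm : 0 < m) (he : e ∣ m) (h : m < e * e) :
    (m / e) * (m / e) < m := by
  have he0 : 0 < e := Nat.pos_of_dvd_of_pos he hm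
  obtain ⟨c, rfl⟩ := he
  rw [Nat.mul_div_cancel_left c he0]
  have hce : c < e := Nat.lt_of_mul_lt_mul_left h
  have hc0 : 0 < c := by
    rcases Nat.eq_zero_or_pos c with h0 | h0
    · subst h0; simp at hm
    · exact h0
  nlinarith

theorem nod_sum_eq_card (m : Nat) (hm : 1 ≤ m) :
    (∑ i ∈ Finset.range (Nat.sqrt m), nodF m (i + 1)) = (m.divisors.card : Int) := by
  have hre : (∑ i ∈ Finset.range (Nat.sqrt m), nodF m (i + 1))
      = ∑ d ∈ Finset.Ico 1 (Nat.sqrt m + 1), nodF m d := by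
    rw [Finset.sum_Ico_eq_sum_range]
    simp only [Nat.add_sub_cancel]
    exact Finset.sum_congr rfl (fun i _ => by rw [Nat.add_comm])
  have hD1 : (Finset.Ico 1 (Nat.sqrt m + 1)).filter (fun d => d ∣ m)
      = m.divisors.filter (fun d => d * d ≤ m) := by
    ext d
    simp only [Finset.mem_filter, Finset.mem_Ico, Nat.mem_divisors]
    constructor
    · rintro ⟨⟨h1, h2⟩, h3⟩
      exact ⟨⟨h3, by omega⟩, Nat.le_sqrt.mp (by omega)⟩
    · rintro ⟨⟨h3, h0⟩, h4⟩
      have hd1 : 1 ≤ d := Nat.pos_of_dvd_of_pos h3 hm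
      have := Nat.le_sqrt.mpr h4
      exact ⟨⟨hd1, by omega⟩, h3⟩
  have hsum2 : (∑ d ∈ Finset.Ico 1 (Nat.sqrt m + 1), nodF m d)
      = ∑ d ∈ m.divisors.filter (fun d => d * d ≤ m), (if d * d = m then (1 : Int) else 2) := by
    rw [← hD1, Finset.sum_filter]
    exact Finset.sum_congr rfl (fun d _ => rfl)
  have hsplit : ∀ d ∈ m.divisors.filter (fun d => d * d ≤ m),
      (if d * d = m then (1 : Int) else 2) = 1 + (if d * d < m then 1 else 0) := by
    intro d hd
    rcases Finset.mem_filter.mp hd with ⟨_, hle⟩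
    by_cases h : d * d = m
    · simp [h]
    · have hlt : d * d < m := lt_of_le_of_ne hle h
      simp [h, hlt]
  have hbij : ((m.divisors.filter (fun d => d * d ≤ m)).filter (fun d => d * d < m)).card
      = (m.divisors.filter (fun d => ¬ d * d ≤ m)).card := by
    have hff : (m.divisors.filter (fun d => d * d ≤ m)).filter (fun d => d * d < m)
        = m.divisors.filter (fun d => d * d < m) := by
      rw [Finset.filter_filter]
      exact Finset.filter_congr (fun d _ => by constructor <;> (intro h; omega))
    rw [hff]
    apply Finset.card_bij' (fun d _ => m / d) (fun e _ => m / e)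
    · intro d hd
      rcases Finset.mem_filter.mp hd with ⟨hdm, hlt⟩
      rcases Nat.mem_divisors.mp hdm with ⟨hdvd, hne⟩
      refine Finset.mem_filter.mpr ⟨Nat.mem_divisors.mpr ⟨Nat.div_dvd_of_dvd hdvd, hne⟩, ?_⟩
      have := pair_lt m d (by omega) hdvd hlt
      omega
    · intro e he
      rcases Finset.mem_filter.mp he with ⟨hem, hgt⟩
      rcases Nat.mem_divisors.mp hem with ⟨hdvd, hne⟩
      refine Finset.mem_filter.mpr ⟨Nat.mem_divisors.mpr ⟨Nat.div_dvd_of_dvd hdvd, hne⟩, ?_⟩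
      exact pair_lt' m e (by omega) hdvd (by omega)
    · intro d hd
      rcases Finset.mem_filter.mp hd with ⟨hdm, _⟩
      rcases Nat.mem_divisors.mp hdm with ⟨hdvd, hne⟩
      exact Nat.div_div_self hdvd hne
    · intro e he
      rcases Finset.mem_filter.mp he with ⟨hem, _⟩
      rcases Nat.mem_divisors.mp hem with ⟨hdvd, hne⟩
      exact Nat.div_div_self hdvd hne
  have hcard : m.divisors.card
      = (m.divisors.filter (fun d => d * d ≤ m)).card
        + (m.divisors.filter (fun d => ¬ d * d ≤ m)).card :=
    (Finset.card_filter_add_card_filter_not (fun d => d * d ≤ m)).symm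
  rw [hre, hsum2, Finset.sum_congr rfl hsplit, Finset.sum_add_distrib, Finset.sum_boole,
    Finset.sum_const, hbij, hcard]
  push_cast [nsmul_eq_mul]
  ring

theorem nod_eq_card (m : Nat) (hm : 1 ≤ m) :
    numberOfDivisors (m : Int) = (m.divisors.card : Int) := by
  unfold numberOfDivisors
  rw [Int.toNat_natCast, nodFold, nod_sum_eq_card m hm]
  ring

theorem card_divisors_prime (p : Nat) (hp : p.Prime) : p.divisors.card = 2 := by
  rw [hp.divisors]
  rw [Finset.card_pair (by have := hp.one_lt; omega)]

-- ---------- the sieve of Eratosthenes computes primality ----------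

def MarkedUpTo (t m : Nat) : Prop := ∃ p, p ≤ t ∧ p.Prime ∧ p ∣ m ∧ p * p ≤ m

theorem marked_succ (t m : Nat) :
    MarkedUpTo (t + 1) m ↔ MarkedUpTo t m ∨ ((t + 1).Prime ∧ (t + 1) ∣ m ∧ (t + 1) * (t + 1) ≤ m) := by
  constructor
  · rintro ⟨p, h1, h2, h3, h4⟩
    rcases Nat.lt_or_ge p (t + 1) with h | h
    · exact Or.inl ⟨p, by omega, h2, h3, h4⟩
    · have : p = t + 1 := by omega
      subst this
      exact Or.inr ⟨h2, h3, h4⟩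
  · rintro (⟨p, h1, h2, h3, h4⟩ | ⟨h2, h3, h4⟩)
    · exact ⟨p, by omega, h2, h3, h4⟩
    · exact ⟨t + 1, le_refl _, h2, h3, h4⟩

theorem sieveInner_length (i : Nat) (k : Int) :
    ∀ (fuel j : Nat) (pr : List Bool), (sieveInner fuel i k j pr).length = pr.length := by
  intro fuel
  induction fuel with
  | zero => intro j pr; rfl
  | succ fuel ih =>
    intro j pr
    unfold sieveInner
    split
    · rw [ih, List.length_set]
    · rfl

theorem sieveInner_getD (n : Nat) (i : Nat) (hi : 2 ≤ i) :
    ∀ (fuel j : Nat) (pr : List Bool), pr.length = n + 1 → n < i * i + j * i + fuel →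
    ∀ m, m ≤ n →
      (sieveInner fuel i ((n : Int)) j pr).getD m false
        = if i ∣ m ∧ i * i + j * i ≤ m then false else pr.getD m false := by
  intro fuel
  induction fuel with
  | zero =>
    intro j pr hlen hf m hm
    rw [if_neg]
    · rfl
    · rintro ⟨_, h⟩; omega
  | succ fuel ih =>
    intro j pr hlen hf m hm
    unfold sieveInner
    by_cases hc : i * i + j * i ≤ n
    · rw [if_pos (show ((i * i + j * i : Nat) : Int) < (n : Int) + 1 by
        exact_mod_cast (show i * i + j * i < n + 1 by omega))]
      have e1 : (j + 1) * i = j * i + i := by ring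
      rw [ih (j + 1) _ (by rw [List.length_set]; exact hlen) (by rw [e1]; omega) m hm]
      by_cases h1 : i ∣ m
      · by_cases h2 : i * i + j * i ≤ m
        · by_cases h3 : i * i + (j + 1) * i ≤ m
          · rw [if_pos ⟨h1, h3⟩, if_pos ⟨h1, h2⟩]
          · rw [if_neg (fun h => h3 h.2), if_pos ⟨h1, h2⟩]
            have hmeq : m = i * i + j * i := by
              obtain ⟨b, hb⟩ := h1
              have e2 : i * i + j * i = i * (i + j) := by ring
              have e3 : i * i + (j + 1) * i = i * (i + j + 1) := by ring
              have h2' : i * (i + j) ≤ i * b := by rw [← e2, ← hb]; exact h2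
              have h3' : i * b < i * (i + j + 1) := by
                rw [← hb, ← e3]; rw [e1] at h3 ⊢; omega
              have hb1 : i + j ≤ b := Nat.le_of_mul_le_mul_left h2' (by omega)
              have hb2 : b < i + j + 1 := Nat.lt_of_mul_lt_mul_left h3'
              have hbe : b = i + j := by omega
              rw [hb, hbe, e2]
            rw [hmeq]
            exact getD_set_self _ _ _ _ (by omega)
        · rw [if_neg (by rintro ⟨_, h⟩; rw [e1] at h; omega),
            if_neg (fun h => h2 h.2)]
          exact getD_set_ne _ _ _ _ _ (by omega)
      · rw [if_neg (fun h => h1 h.1), if_neg (fun h => h1 h.1)]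
        refine getD_set_ne _ _ _ _ _ (fun heq => h1 ?_)
        rw [← heq]
        exact ⟨i + j, by ring⟩
    · rw [if_neg (show ¬ ((i * i + j * i : Nat) : Int) < (n : Int) + 1 by
        exact_mod_cast (show ¬ i * i + j * i < n + 1 by omega))]
      rw [if_neg (by rintro ⟨_, h⟩; omega)]

def SieveInv (n t : Nat) (pr : List Bool) : Prop :=
  pr.length = n + 1 ∧ ∀ m, m ≤ n → (pr.getD m false = true ↔ (2 ≤ m ∧ ¬ MarkedUpTo t m))

theorem sieve_step_inv (n a : Nat) (ha : 2 ≤ a) (han : a ≤ n) (pr : List Bool)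
    (h : SieveInv n (a - 1) pr) : SieveInv n a (sieveStep ((n : Int)) pr a) := by
  obtain ⟨hlen, hinv⟩ := h
  have hsucc : a - 1 + 1 = a := by omega
  unfold sieveStep
  rw [Int.toNat_natCast]
  by_cases hpa : a.Prime
  · have hread : pr.getD a false = true := by
      rw [hinv a han]
      refine ⟨ha, ?_⟩
      rintro ⟨p, h1, h2, h3, _⟩
      have : p = a := (Nat.prime_dvd_prime_iff_eq h2 hpa).mp h3
      omega
    rw [if_pos hread]
    refine ⟨by rw [sieveInner_length]; exact hlen, ?_⟩
    intro m hm
    rw [sieveInner_getD n a ha (n + 1) 0 pr hlen (by omega) m hm]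
    simp only [Nat.zero_mul, Nat.add_zero]
    have hsplit : ∀ m', MarkedUpTo a m' ↔ MarkedUpTo (a - 1) m' ∨ (a ∣ m' ∧ a * a ≤ m') := by
      intro m'
      rw [← hsucc, marked_succ, hsucc]
      constructor
      · rintro (h | ⟨_, h3, h4⟩)
        · exact Or.inl h
        · exact Or.inr ⟨h3, h4⟩
      · rintro (h | ⟨h3, h4⟩)
        · exact Or.inl h
        · exact Or.inr ⟨hpa, h3, h4⟩
    by_cases hcond : a ∣ m ∧ a * a ≤ m
    · rw [if_pos hcond]
      simp only [Bool.false_eq_true, false_iff]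
      rintro ⟨_, hnm⟩
      exact hnm ((hsplit m).mpr (Or.inr hcond))
    · rw [if_neg hcond, hinv m hm]
      constructor
      · rintro ⟨h2m, hnm⟩
        refine ⟨h2m, fun hma => ?_⟩
        rcases (hsplit m).mp hma with h | h
        · exact hnm h
        · exact hcond h
      · rintro ⟨h2m, hnm⟩
        exact ⟨h2m, fun hma => hnm ((hsplit m).mpr (Or.inl hma))⟩
  · have hmark : MarkedUpTo (a - 1) a := by
      have hane : a ≠ 1 := by omega
      have hp : a.minFac.Prime := Nat.minFac_prime hane
      have hdvd : a.minFac ∣ a := Nat.minFac_dvd a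
      have hsq : a.minFac * a.minFac ≤ a := by
        have := Nat.minFac_sq_le_self (by omega : 0 < a) hpa
        rwa [pow_two] at this
      have hle : a.minFac ≤ a - 1 := by
        have h1 : a.minFac ≤ a := Nat.minFac_le (by omega)
        have h2 : a.minFac ≠ a := fun he => hpa (Nat.prime_def_minFac.mpr ⟨ha, he⟩)
        omega
      exact ⟨a.minFac, hle, hp, hdvd, hsq⟩
    have hread : ¬ (pr.getD a false = true) := by
      rw [hinv a han]
      rintro ⟨_, hnm⟩
      exact hnm hmark
    rw [if_neg hread]
    refine ⟨hlen, fun m hm => ?_⟩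
    rw [hinv m hm]
    have heq : MarkedUpTo a m ↔ MarkedUpTo (a - 1) m := by
      rw [← hsucc, marked_succ, hsucc]
      constructor
      · rintro (h | ⟨h2, _, _⟩)
        · exact h
        · exact absurd h2 hpa
      · exact Or.inl
    rw [heq]

theorem sieve_fold_inv (n : Nat) :
    ∀ (len a : Nat) (pr : List Bool), 2 ≤ a → a + len ≤ n + 1 → SieveInv n (a - 1) pr →
      SieveInv n (a - 1 + len) ((List.range' a len).foldl (sieveStep (n : Int)) pr) := by
  intro len
  induction len with
  | zero => intro a pr _ _ h; simpa using h
  | succ len ih =>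
    intro a pr ha hb hinv
    rw [List.range'_succ, List.foldl_cons]
    have h1 := sieve_step_inv n a ha (by omega) pr hinv
    have h2 := ih (a + 1) _ (by omega) (by omega) (by simpa using h1)
    have he : a - 1 + (len + 1) = a + 1 - 1 + len := by omega
    rw [he]
    exact h2

theorem sieve_init (n : Nat) (hn : 1 ≤ n) :
    SieveInv n 1 (((List.replicate (n + 1) true).set 0 false).set 1 false) := by
  refine ⟨by simp, ?_⟩
  intro m hm
  have hnomark : ¬ MarkedUpTo 1 m := by
    rintro ⟨p, h1, h2, _, _⟩
    have := h2.two_le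
    omega
  by_cases h0 : m = 0
  · subst h0
    rw [getD_set_ne _ _ _ _ _ (by omega), getD_set_self _ _ _ _ (by simp)]
    simp
  · by_cases h1 : m = 1
    · subst h1
      rw [getD_set_self _ _ _ _ (by simp; omega)]
      simp
    · rw [getD_set_ne _ _ _ _ _ (by omega), getD_set_ne _ _ _ _ _ (by omega),
        getD_replicate_of_lt _ _ _ _ (by omega)]
      simp only [true_iff]
      exact ⟨by omega, hnomark⟩

theorem marked_iff_not_prime (n m : Nat) (hm2 : 2 ≤ m) (hmn : m ≤ n) :
    MarkedUpTo (Nat.sqrt n) m ↔ ¬ m.Prime := by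
  constructor
  · rintro ⟨p, _, h2, h3, h4⟩ hp
    have : p = m := (Nat.prime_dvd_prime_iff_eq h2 hp).mp h3
    subst this
    nlinarith
  · intro hp
    have hane : m ≠ 1 := by omega
    have hq : m.minFac.Prime := Nat.minFac_prime hane
    have hdvd : m.minFac ∣ m := Nat.minFac_dvd m
    have hsq : m.minFac * m.minFac ≤ m := by
      have := Nat.minFac_sq_le_self (by omega : 0 < m) hp
      rwa [pow_two] at this
    exact ⟨m.minFac, Nat.le_sqrt.mpr (by omega), hq, hdvd, hsq⟩

theorem sieve_primes (n : Nat) (hn : 1 ≤ n) (m : Nat) (hm2 : 2 ≤ m) (hmn : m ≤ n) :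
    ((List.range' 2 (Nat.sqrt n - 1)).foldl (sieveStep (n : Int))
        (((List.replicate (n + 1) true).set 0 false).set 1 false)).getD m false
      = decide m.Prime := by
  have hs1 : 1 ≤ Nat.sqrt n := by
    have := Nat.le_sqrt.mpr (by omega : 1 * 1 ≤ n)
    omega
  have hsn : Nat.sqrt n ≤ n := Nat.sqrt_le_self n
  have hinv := sieve_fold_inv n (Nat.sqrt n - 1) 2
    (((List.replicate (n + 1) true).set 0 false).set 1 false) (by omega) (by omega)
    (by simpa using sieve_init n hn)
  have he : 2 - 1 + (Nat.sqrt n - 1) = Nat.sqrt n := by omega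
  rw [he] at hinv
  have h := hinv.2 m hmn
  rw [marked_iff_not_prime n m hm2 hmn, not_not] at h
  by_cases hp : m.Prime
  · rw [h.mpr ⟨hm2, hp⟩, decide_eq_true hp]
  · rw [decide_eq_false hp]
    exact Bool.eq_false_iff.mpr (fun hb => hp (h.mp hb).2)

-- ---------- B's additive sieve computes τ(m) ----------

theorem fold_addMult_length (d : Nat) :
    ∀ (l : List Nat) (dv : List Int), (l.foldl (addMultiples d) dv).length = dv.length := by
  intro l
  induction l with
  | nil => intro dv; rfl
  | cons q l ih => intro dv; rw [List.foldl_cons, ih, addMultiples, List.length_set]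

theorem fold_addMult_getD (d : Nat) (hd : 1 ≤ d) :
    ∀ (len a : Nat) (dv : List Int), (∀ q, a ≤ q → q < a + len → d * q < dv.length) →
    ∀ m : Nat, ((List.range' a len).foldl (addMultiples d) dv).getD m 0
      = if d ∣ m ∧ d * a ≤ m ∧ m < d * (a + len) then dv.getD m 0 + 1 else dv.getD m 0 := by
  intro len
  induction len with
  | zero =>
    intro a dv _ m
    rw [if_neg]
    · rfl
    · rintro ⟨_, h1, h2⟩
      simp only [Nat.add_zero] at h2
      omega
  | succ len ih =>
    intro a dv hlen m
    have hdv' : addMultiples d dv a = dv.set (d * a) (dv.getD (d * a) 0 + 1) := rfl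
    rw [List.range'_succ, List.foldl_cons,
      ih (a + 1) _ (fun q hq1 hq2 => by
        rw [hdv', List.length_set]; exact hlen q (by omega) (by omega))]
    have e1 : d * (a + 1) = d * a + d := by ring
    have e2 : d * (a + (len + 1)) = d * a + d * len + d := by ring
    have e3 : d * (a + 1 + len) = d * a + d * len + d := by ring
    by_cases h1 : d ∣ m
    · obtain ⟨c, hc⟩ := h1
      by_cases h2 : d * a ≤ m
      · by_cases h4 : d * (a + 1) ≤ m
        · by_cases h3 : m < d * (a + (len + 1))
          · rw [if_pos ⟨⟨c, hc⟩, h4, by omega⟩, if_pos ⟨⟨c, hc⟩, h2, h3⟩, hdv',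
              getD_set_ne _ _ _ _ _ (by omega)]
          · rw [if_neg (by rintro ⟨_, _, h⟩; omega), if_neg (by rintro ⟨_, _, h⟩; omega), hdv',
              getD_set_ne _ _ _ _ _ (by omega)]
        · -- d*a ≤ m < d*(a+1): here m = d*a, the cell written by this step
          have hca : c = a := by
            have hb1 : d * a ≤ d * c := by omega
            have hb2 : d * c < d * (a + 1) := by omega
            have hx1 := Nat.le_of_mul_le_mul_left hb1 (by omega : 0 < d)
            have hx2 := Nat.lt_of_mul_lt_mul_left hb2
            omega
          have hma : m = d * a := by rw [hc, hca]
          rw [if_neg (by rintro ⟨_, h, _⟩; omega), if_pos ⟨⟨c, hc⟩, h2, by omega⟩, hdv', hma,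
            getD_set_self _ _ _ _ (hlen a (le_refl a) (by omega))]
      · rw [if_neg (by rintro ⟨_, h, _⟩; omega), if_neg (by rintro ⟨_, h, _⟩; omega), hdv',
          getD_set_ne _ _ _ _ _ (by omega)]
    · rw [if_neg (fun h => h1 h.1), if_neg (fun h => h1 h.1), hdv']
      exact getD_set_ne _ _ _ _ _ (fun he => h1 (by rw [← he]; exact ⟨a, rfl⟩))

theorem divsieve_fold_getD (n : Nat) (m : Nat) (hm : 1 ≤ m) (hmn : m ≤ n) :
    ∀ (len a : Nat) (dv : List Int), dv.length = n + 1 → 1 ≤ a →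
      ((List.range' a len).foldl (divSieveStep (n : Int)) dv).getD m 0
        = dv.getD m 0 + (((Finset.Ico a (a + len)).filter (fun d => d ∣ m)).card : Int) := by
  intro len
  induction len with
  | zero => intro a dv _ _; simp
  | succ len ih =>
    intro a dv hlen ha
    rw [List.range'_succ, List.foldl_cons]
    have hstep : (divSieveStep ((n : Int)) dv a).getD m 0
        = dv.getD m 0 + (if a ∣ m then (1 : Int) else 0) := by
      unfold divSieveStep
      rw [Int.toNat_natCast]
      rw [fold_addMult_getD a ha (n / a) 1 dv (fun q hq1 hq2 => by
        rw [hlen]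
        have h1 : a * q ≤ a * (n / a) := Nat.mul_le_mul (le_refl a) (by omega)
        have h2 : a * (n / a) ≤ n := by
          rw [Nat.mul_comm]
          exact Nat.div_mul_le_self n a
        omega) m]
      by_cases had : a ∣ m
      · have hcond : a ∣ m ∧ a * 1 ≤ m ∧ m < a * (1 + n / a) := by
          refine ⟨had, by rw [Nat.mul_one]; exact Nat.le_of_dvd (by omega) had, ?_⟩
          obtain ⟨c, hc⟩ := had
          have hca : c ≤ n / a := by
            have hcm : c = m / a := by rw [hc, Nat.mul_div_cancel_left c (by omega)]
            rw [hcm]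
            exact Nat.div_le_div_right hmn
          have h2 : a * c ≤ a * (n / a) := Nat.mul_le_mul (le_refl a) hca
          have e1 : a * (1 + n / a) = a + a * (n / a) := by ring
          omega
        rw [if_pos hcond, if_pos had]
      · rw [if_neg (fun h => had h.1), if_neg had]
        ring
    have hlen2 : (divSieveStep ((n : Int)) dv a).length = n + 1 := by
      unfold divSieveStep
      rw [fold_addMult_length]
      exact hlen
    rw [ih (a + 1) _ hlen2 (by omega), hstep]
    have hins : Finset.Ico a (a + (len + 1)) = insert a (Finset.Ico (a + 1) (a + 1 + len)) := by
      ext x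
      simp only [Finset.mem_Ico, Finset.mem_insert]
      omega
    rw [hins, Finset.filter_insert]
    by_cases had : a ∣ m
    · have hnotmem : a ∉ (Finset.Ico (a + 1) (a + 1 + len)).filter (fun d => d ∣ m) := by
        intro hmem
        have h := (Finset.mem_filter.mp hmem).1
        rw [Finset.mem_Ico] at h
        omega
      rw [if_pos had, if_pos had, Finset.card_insert_of_notMem hnotmem]
      push_cast
      ring
    · rw [if_neg had, if_neg had]
      ring

theorem divsieve_getD (n : Nat) (m : Nat) (hm : 1 ≤ m) (hmn : m ≤ n) :
    ((List.range' 1 n).foldl (divSieveStep (n : Int)) (List.replicate (n + 1) (0 : Int))).getD m 0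
      = (m.divisors.card : Int) := by
  rw [divsieve_fold_getD n m hm hmn n 1 _ (by simp) (le_refl 1),
    getD_replicate_of_lt _ _ _ _ (by omega)]
  have hset : (Finset.Ico 1 (1 + n)).filter (fun d => d ∣ m) = m.divisors := by
    ext x
    simp only [Finset.mem_filter, Finset.mem_Ico, Nat.mem_divisors]
    constructor
    · rintro ⟨⟨h1, h2⟩, h3⟩
      exact ⟨h3, by omega⟩
    · rintro ⟨h3, _⟩
      have h1 : 1 ≤ x := Nat.pos_of_dvd_of_pos h3 (by omega)
      have h2 : x ≤ m := Nat.le_of_dvd (by omega) h3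
      exact ⟨⟨h1, by omega⟩, h3⟩
  rw [hset]
  ring

-- ---------- the two first-maximum scans agree ----------

theorem main_fold_eq (primes : List Bool) (div : List Int) (cnt : Nat → Int) :
    ∀ (l : List Nat),
      (∀ i ∈ l, (if primes.getD i false then (2 : Int) else numberOfDivisors (i : Int)) = cnt i) →
      (∀ i ∈ l, div.getD i 0 = cnt i) →
      ∀ (mx : Int × Int) (dvs : List Int),
        (l.foldl (mainStepA primes) (mx.1, mx.2, dvs)).2.1 = (l.foldl (mainStepB div) mx).2 := by
  intro l
  induction l with
  | nil => intro _ _ mx dvs; rfl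
  | cons i l ih =>
    intro hA hB mx dvs
    simp only [List.foldl_cons]
    have hc : (if primes.getD i false then (2 : Int) else numberOfDivisors (i : Int))
        = div.getD i 0 := by
      rw [hA i (List.mem_cons_self), hB i (List.mem_cons_self)]
    have hstepA : mainStepA primes (mx.1, mx.2, dvs) i
        = ((mainStepB div mx i).1, (mainStepB div mx i).2, dvs.set i (div.getD i 0)) := by
      unfold mainStepA mainStepB
      dsimp only
      rw [hc]
    rw [hstepA]
    exact ih (fun j hj => hA j (List.mem_cons_of_mem _ hj))
      (fun j hj => hB j (List.mem_cons_of_mem _ hj)) (mainStepB div mx i) _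

theorem main_equiv (n : Nat) (hn : 1 ≤ n) : solve ((n : Int)) = solve_alt ((n : Int)) := by
  unfold solve solve_alt
  simp only [Int.toNat_natCast]
  have key := main_fold_eq
    ((List.range' 2 (Nat.sqrt n - 1)).foldl (sieveStep ((n : Int)))
      (((List.replicate (n + 1) true).set 0 false).set 1 false))
    ((List.range' 1 n).foldl (divSieveStep ((n : Int))) (List.replicate (n + 1) (0 : Int)))
    (fun i => ((i : Nat).divisors.card : Int))
    (List.range' 2 (n - 1))
    (by
      intro i hi
      rcases List.mem_range'_1.mp hi with ⟨h2, h3⟩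
      have hin : i ≤ n := by omega
      rw [sieve_primes n hn i h2 hin]
      by_cases hp : i.Prime
      · simp only [hp, decide_true, if_true]
        exact_mod_cast (card_divisors_prime i hp).symm
      · simp only [hp, decide_false]
        exact nod_eq_card i (by omega))
    (by
      intro i hi
      rcases List.mem_range'_1.mp hi with ⟨h2, h3⟩
      exact divsieve_getD n i (by omega) (by omega))
    ((0 : Int), (0 : Int))
    (((List.replicate (n + 1) (2 : Int)).set 0 0).set 1 1)
  rw [key]

-- ===== VERDICT (by name: the statement is the Claim_ definition above) =====
theorem solve_spec : Claim_equal_solve := by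
  intro k _ hpre
  unfold Spec_solve
  have hk0 : 0 ≤ k := by unfold Pre_solve at hpre; omega
  obtain ⟨n, rfl⟩ : ∃ n : Nat, k = (n : Int) := ⟨k.toNat, (Int.toNat_of_nonneg hk0).symm⟩
  have hn : 1 ≤ n := by unfold Pre_solve at hpre; exact_mod_cast hpre
  exact main_equiv n hn
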